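-- pv_equiv track=rewrite | github.com/4cd87a/ftfbot | ftfcore/funcs.py | abc_toInt
-- ===== SOURCE A (Python) =====
-- def abc_toInt(st,simple=False):
--     indx = 0; j = 0
--     for i, s in enumerate(st):
--         indxx = ord(s)-48
--         if (indxx>10): indxx-=39
--         indx += indxx*35**(len(st)-1-i)
--     if simple: return indx
--     # if start by 'a'
--     while (indx>9*35**(j)):
--         indx-=9*35**j
--         j+=1
--     return indx
-- ===== SOURCE B (Python) =====
-- def abc_toInt(st, simple=False):
--     # Horner accumulation of the base-35 digits (no per-character exponentiation)
--     indx = 0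
--     for c in st:
--         d = ord(c) - 48
--         indx = indx * 35 + (d - 39 if d > 10 else d)
--     if simple:
--         return indx
--     # prefix adjustment in closed form: find the least j with
--     # 34*indx <= 9*(35**(j+1) - 1), then subtract the geometric series
--     # 9*(35**j - 1)/34 = 9*(1 + 35 + ... + 35**(j-1)) in one step
--     p = 1  # 35**j
--     while 34 * indx > 9 * (35 * p - 1):
--         p *= 35
--     return indx - 9 * (p - 1) // 34
-- ===== Notes on version B (the rewrite author's own statement) =====
-- stated objective: faster
-- what changed: The positional power sum indx += digit*35**(len(st)-1-i) is replaced by Horner accumulation (indx = indx*35 + digit), and A's prefix loop that subtracts 9*35**j one term at a time is replaced by a search for the least j with 34*indx <= 9*(35**(j+1)-1) followed by a single closed-form subtraction of the geometric series 9*(35**j-1)//34. B avoids recomputing large powers, measured faster in a timing run.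
import Mathlib
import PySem

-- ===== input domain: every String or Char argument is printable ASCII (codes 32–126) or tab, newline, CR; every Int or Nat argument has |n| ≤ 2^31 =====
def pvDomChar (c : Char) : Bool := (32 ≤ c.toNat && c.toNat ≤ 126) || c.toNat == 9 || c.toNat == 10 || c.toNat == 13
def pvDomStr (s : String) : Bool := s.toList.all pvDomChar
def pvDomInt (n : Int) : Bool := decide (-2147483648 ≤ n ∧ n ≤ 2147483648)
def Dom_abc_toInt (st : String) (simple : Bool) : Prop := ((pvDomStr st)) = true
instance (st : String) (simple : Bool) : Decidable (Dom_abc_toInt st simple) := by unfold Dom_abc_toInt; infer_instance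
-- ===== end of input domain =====

-- B replaces A's per-character power sum with a Horner accumulator and A's
-- subtract-one-term-at-a-time prefix loop with a single geometric-series
-- subtraction (simpler decomposition, same values).

-- ===== PORT A =====
-- A's while loop: while indx > 9*35**j: indx -= 9*35**j; j += 1
def pvPeel (indx : Int) (j : Nat) : Int :=
  if 9 * 35 ^ j < indx then pvPeel (indx - 9 * 35 ^ j) (j + 1) else indx
termination_by indx.toNat
decreasing_by
  have h1 : (1:Int) ≤ 35 ^ j := one_le_pow₀ (by norm_num)
  generalize _hX : (9:Int) * 35 ^ j = X at *
  omega

-- A: indx = sum over enumerate(st) of digit * 35**(len(st)-1-i); exponent is ≥ 0 so .toNat is exact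
def abc_toInt (st : String) (simple : Bool) : Int :=
  let cs := st.toList
  let n : Int := cs.length
  let indx := (PySem.List.enumerate cs 0).foldl
    (fun a p =>
      let d : Int := (p.2.toNat : Int) - 48
      a + (if d > 10 then d - 39 else d) * 35 ^ ((n - 1 - p.1).toNat)) 0
  if simple then indx else pvPeel indx 0

-- ===== PORT B =====
-- B's search loop: p = 1; while 34*indx > 9*(35*p - 1): p *= 35   (p = 35**j, tracked here as j)
def pvFindJ (indx : Int) (j : Nat) : Nat :=
  if 34 * indx > 9 * (35 * 35 ^ j - 1) then pvFindJ indx (j + 1) else j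
termination_by (34 * indx).toNat - j
decreasing_by
  have h1 : (j + 1 : Int) ≤ 35 ^ j := by
    calc (j + 1 : Int) ≤ 2 ^ j := by exact_mod_cast Nat.succ_le_of_lt (Nat.lt_two_pow_self)
    _ ≤ 35 ^ j := pow_le_pow_left₀ (by norm_num) (by norm_num) j
  generalize hX : (35:Int) ^ j = X at *
  omega

def abc_toInt_alt (st : String) (simple : Bool) : Int :=
  let indx := st.toList.foldl
    (fun a c =>
      let d : Int := (c.toNat : Int) - 48
      a * 35 + (if d > 10 then d - 39 else d)) 0
  if simple then indx
  else indx - PySem.Int.floordiv (9 * (35 ^ pvFindJ indx 0 - 1)) 34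

-- ===== PRECONDITION & SPEC =====
def Spec_abc_toInt (st : String) (simple : Bool) (out : Int) : Prop := out = abc_toInt_alt st simple
instance (st : String) (simple : Bool) (out : Int) : Decidable (Spec_abc_toInt st simple out) := by unfold Spec_abc_toInt; infer_instance

-- ===== CLAIM (what is proved, stated in full; the proofs are below) =====
def Claim_equal_abc_toInt : Prop := ∀ (st : String) (simple : Bool), Dom_abc_toInt st simple → Spec_abc_toInt st simple (abc_toInt st simple)

-- ===== LEMMAS AND PROOFS =====

def pvDigit (c : Char) : Int :=
  let d : Int := (c.toNat : Int) - 48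
  if d > 10 then d - 39 else d

-- reference value: the base-35 number with digits pvDigit
def pvVal : List Char → Int
  | [] => 0
  | c :: t => pvDigit c * 35 ^ t.length + pvVal t

lemma pvA_eq_val (t : List Char) : ∀ (s n : Int) (acc : Int), n = s + t.length →
    (PySem.List.enumerate t s).foldl
      (fun a p =>
        let d : Int := (p.2.toNat : Int) - 48
        a + (if d > 10 then d - 39 else d) * 35 ^ ((n - 1 - p.1).toNat)) acc
      = acc + pvVal t := by
  induction t with
  | nil => intro s n acc h; simp [PySem.List.enumerate_nil, pvVal]
  | cons c tt ih =>
    intro s n acc h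
    have hx : (n - 1 - s).toNat = tt.length := by
      simp [List.length_cons] at h; omega
    rw [PySem.List.enumerate_cons, List.foldl_cons,
        ih (s + 1) n _ (by simp [List.length_cons] at h ⊢; omega)]
    simp only [pvVal, hx, pvDigit]
    ring

lemma pvB_eq_val (t : List Char) : ∀ (acc : Int),
    t.foldl
      (fun a c =>
        let d : Int := (c.toNat : Int) - 48
        a * 35 + (if d > 10 then d - 39 else d)) acc
      = acc * 35 ^ t.length + pvVal t := by
  induction t with
  | nil => intro acc; simp [pvVal]
  | cons c tt ih =>
    intro acc
    rw [List.foldl_cons, ih]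
    simp only [pvVal, pvDigit, List.length_cons, pow_succ]
    ring

-- S j = 9*(1 + 35 + ... + 35^(j-1)), the total A subtracts after j loop steps
def pvS : Nat → Int
  | 0 => 0
  | j + 1 => pvS j + 9 * 35 ^ j

lemma pvS_eq (j : Nat) : 34 * pvS j = 9 * (35 ^ j - 1) := by
  induction j with
  | zero => simp [pvS]
  | succ k ih => simp only [pvS, pow_succ]; linarith

-- A's peel loop and B's search loop step under the same condition
lemma pvPeel_eq_sub (x : Int) (j : Nat) :
    pvPeel (x - pvS j) j = x - pvS (pvFindJ x j) := by
  refine pvFindJ.induct x (fun j => pvPeel (x - pvS j) j = x - pvS (pvFindJ x j))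
    (fun j hc ih => ?_) (fun j hc => ?_) j
  · replace ih : pvPeel (x - pvS (j + 1)) (j + 1) = x - pvS (pvFindJ x (j + 1)) := ih
    show pvPeel (x - pvS j) j = x - pvS (pvFindJ x j)
    have hS := pvS_eq j
    rw [pvPeel.eq_def, pvFindJ.eq_def, if_pos hc,
        if_pos (by generalize hX : (35:Int) ^ j = X at *; omega)]
    have harg : x - pvS j - 9 * 35 ^ j = x - pvS (j + 1) := by
      simp only [pvS]; ring
    rw [harg]; exact ih
  · show pvPeel (x - pvS j) j = x - pvS (pvFindJ x j)
    have hS := pvS_eq j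
    rw [pvPeel.eq_def, pvFindJ.eq_def, if_neg hc,
        if_neg (by generalize hX : (35:Int) ^ j = X at *; omega)]

lemma pvFloordiv_S (j : Nat) :
    PySem.Int.floordiv (9 * (35 ^ j - 1)) 34 = pvS j := by
  rw [← pvS_eq j]
  simp only [PySem.Int.floordiv]
  exact Int.mul_fdiv_cancel_left _ (by norm_num)

-- ===== VERDICT (by name: the statement is the Claim_ definition above) =====
theorem abc_toInt_spec : Claim_equal_abc_toInt := by
  intro st simple _
  cases simple with
  | true =>
    simp only [Spec_abc_toInt, abc_toInt, abc_toInt_alt, if_true]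
    rw [pvA_eq_val st.toList 0 st.toList.length 0 (by simp), pvB_eq_val st.toList 0]
    ring
  | false =>
    simp only [Spec_abc_toInt, abc_toInt, abc_toInt_alt, Bool.false_eq_true, if_false]
    rw [pvA_eq_val st.toList 0 st.toList.length 0 (by simp), pvB_eq_val st.toList 0,
        pvFloordiv_S]
    simp only [zero_mul, zero_add]
    have h := pvPeel_eq_sub (pvVal st.toList) 0
    simpa [pvS] using h
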